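-- pv_equiv track=rewrite | github.com/ggdna/seqwalk | src/seqwalk/generation.py | f
-- ===== SOURCE A (Python) =====
-- def is_necklace(seq):
--     """
--     computes if a sequence is a necklace (as defined in Wong 2017)
--
--     Args:
--         seq: typically list of ints
--     """
--
--     p = 1
--
--     for i in range(1, len(seq)):
--         if seq[i-p] < seq[i]:
--             p = i + 1
--         elif seq[i-p] > seq[i]:
--             return False
--
--     if (len(seq) % (p)) == 0:
--         return True
--     return False
--
-- def f(seq, k):
--     """
--     helper function defined in Wong 2017
--     * note confusing notation switch
--
--     Args:
--        seq: list of ints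
--        k: alphabet length
--
--     Returns:
--        int corresponding to next element of seq
--     """
--
--     p = 1
--
--     if seq[0] == k:
--         if sum(seq[1:]) == len(seq) - 1:
--             return 1
--         for i in range(0, k-1):
--             if not is_necklace(seq[1:] + [k-i]):
--                 return k-i
--         return 1
--
--     elif is_necklace(seq[1:] + [(seq[0] % k) + 1]):
--         return (seq[0] % k) + 1
--
--     else:
--         return seq[0]
-- ===== SOURCE B (Python) =====
-- def f(seq, k):
--     """Precompute the Duval/necklace loop state of seq[1:] once, then decide
--     is_necklace(seq[1:] + [x]) for each candidate x in O(1)."""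
--     t = seq[1:]
--     m = len(t)
--     # one pass: state of the necklace loop on t
--     p = 1
--     failed = False
--     for i in range(1, m):
--         if t[i - p] < t[i]:
--             p = i + 1
--         elif t[i - p] > t[i]:
--             failed = True
--             break
--
--     def good(x):
--         # is_necklace(t + [x]) using the precomputed state
--         if failed:
--             return False
--         if m == 0:
--             return True
--         c = t[m - p]
--         if c < x:
--             return True
--         if c > x:
--             return False
--         return (m + 1) % p == 0
--
--     first = seq[0]
--     if first == k:
--         if sum(t) == m:
--             return 1
--         for i in range(k - 1):
--             if not good(k - i):
--                 return k - i
--         return 1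
--     nxt = (first % k) + 1
--     return nxt if good(nxt) else first
-- ===== Notes on version B (the rewrite author's own statement) =====
-- stated objective: alternative
-- what changed: B runs the Wong-2017 necklace loop over seq[1:] exactly once, storing its state (failed, p), and then decides is_necklace(seq[1:]+[x]) for every candidate last element x in O(1) from that state, instead of A's full is_necklace pass per candidate (asymptotically O(n+k) vs O(n*k) in the candidate loop, but a timing run's inputs rarely exercise that branch, so no speed is claimed).
import Mathlib
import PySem

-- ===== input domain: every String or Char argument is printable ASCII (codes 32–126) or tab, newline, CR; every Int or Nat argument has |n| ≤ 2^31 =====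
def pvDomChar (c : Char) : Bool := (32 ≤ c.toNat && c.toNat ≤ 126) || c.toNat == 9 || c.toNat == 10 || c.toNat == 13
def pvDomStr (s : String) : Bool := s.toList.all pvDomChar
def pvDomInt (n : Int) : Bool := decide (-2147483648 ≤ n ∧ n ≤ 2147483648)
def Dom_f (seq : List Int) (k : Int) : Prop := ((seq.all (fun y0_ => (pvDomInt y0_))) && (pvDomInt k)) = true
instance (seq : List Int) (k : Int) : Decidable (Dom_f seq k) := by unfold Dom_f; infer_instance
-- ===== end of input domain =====

-- B precomputes the necklace-loop state of seq[1:] once and tests each candidate in O(1),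
-- instead of A's full is_necklace pass per candidate.

-- ===== PORT A =====
-- A's is_necklace loop: returns `none` for the early `return False`, `some p` when the
-- loop completes.  Indices i-p and i are always in range (1 ≤ p ≤ i < len), so getD is exact.
def neckLoop (s : List Int) (i p : Nat) : Option Nat :=
  if i < s.length then
    if s.getD (i - p) 0 < s.getD i 0 then neckLoop s (i + 1) (i + 1)
    else if s.getD i 0 < s.getD (i - p) 0 then none
    else neckLoop s (i + 1) p
  else some p
termination_by s.length - i
decreasing_by all_goals omega

def is_necklace (s : List Int) : Bool :=
  match neckLoop s 1 1 with
  | none => false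
  | some p => decide (s.length % p = 0)

-- A's `for i in range(0, k-1): if not is_necklace(...): return k-i` loop with early return
def tryNext (t : List Int) (k : Int) : List Int → Int
  | [] => 1
  | i :: rest => if is_necklace (t ++ [k - i]) = false then k - i else tryNext t k rest

def f (seq : List Int) (k : Int) : Int :=
  let first := seq.headD 0        -- seq[0]; Pre_f rules out the empty list (IndexError)
  let t := seq.drop 1             -- seq[1:]
  if first = k then
    if t.sum = (seq.length : Int) - 1 then 1
    else tryNext t k (PySem.List.pyRange 0 (k - 1) 1)
  else
    let c := PySem.Int.mod first k + 1   -- (seq[0] % k) + 1; Pre_f rules out k = 0 here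
    if is_necklace (t ++ [c]) then c else first

-- ===== PORT B =====
-- B's single precomputation pass over t = seq[1:]: (failed?, p) of the necklace loop.
def stateB (t : List Int) (i p : Nat) : Bool × Nat :=
  if i < t.length then
    if t.getD (i - p) 0 < t.getD i 0 then stateB t (i + 1) (i + 1)
    else if t.getD i 0 < t.getD (i - p) 0 then (true, p)
    else stateB t (i + 1) p
  else (false, p)
termination_by t.length - i
decreasing_by all_goals omega

-- B's O(1) test: is t ++ [x] a necklace, given the precomputed state?
def goodB (t : List Int) (m : Nat) (st : Bool × Nat) (x : Int) : Bool :=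
  if st.1 then false
  else if m = 0 then true
  else
    let c := t.getD (m - st.2) 0
    if c < x then true
    else if x < c then false
    else decide ((m + 1) % st.2 = 0)

def tryNextB (t : List Int) (m : Nat) (st : Bool × Nat) (k : Int) : List Int → Int
  | [] => 1
  | i :: rest => if goodB t m st (k - i) = false then k - i else tryNextB t m st k rest

def f_alt (seq : List Int) (k : Int) : Int :=
  let t := seq.drop 1
  let m := t.length
  let st := stateB t 1 1
  let first := seq.headD 0
  if first = k then
    if t.sum = (m : Int) then 1
    else tryNextB t m st k (PySem.List.pyRange 0 (k - 1) 1)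
  else
    let nxt := PySem.Int.mod first k + 1
    if goodB t m st nxt then nxt else first

-- ===== PRECONDITION & SPEC =====
-- Pre_f excludes exactly the inputs on which Python A raises: the empty list (IndexError on
-- seq[0]) and k = 0 with seq[0] ≠ 0 (ZeroDivisionError on seq[0] % k).
def Pre_f (seq : List Int) (k : Int) : Prop := seq ≠ [] ∧ (seq.headD 0 = k ∨ k ≠ 0)
instance (seq : List Int) (k : Int) : Decidable (Pre_f seq k) := by unfold Pre_f; infer_instance
def pvWitness_f : List Int × Int := ([2, 1, 2], 2)

def Spec_f (seq : List Int) (k : Int) (out : Int) : Prop := out = f_alt seq k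
instance (seq : List Int) (k : Int) (out : Int) : Decidable (Spec_f seq k out) := by unfold Spec_f; infer_instance

-- ===== CLAIM (what is proved, stated in full; the proofs are below) =====
def Claim_equal_f : Prop := ∀ (seq : List Int) (k : Int), Dom_f seq k → Pre_f seq k → Spec_f seq k (f seq k)

-- ===== LEMMAS AND PROOFS =====

theorem neckLoop_last (t : List Int) (x : Int) (p : Nat) (hp1 : 1 ≤ p) (hpl : p ≤ t.length) :
    neckLoop (t ++ [x]) t.length p =
      (if t.getD (t.length - p) 0 < x then some (t.length + 1)
       else if x < t.getD (t.length - p) 0 then none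
       else some p) := by
  rw [neckLoop]
  have h1 : t.length < (t ++ [x]).length := by simp
  have h2 : (t ++ [x]).getD (t.length - p) 0 = t.getD (t.length - p) 0 :=
    List.getD_append _ _ _ _ (by omega)
  have h3 : (t ++ [x]).getD t.length 0 = x := by
    rw [List.getD_append_right (h := le_refl _)]; simp
  rw [if_pos h1, h2, h3]
  split
  · rw [neckLoop]; simp
  · split
    · rfl
    · rw [neckLoop]; simp

theorem neckLoop_append (t : List Int) (x : Int) :
    ∀ n i p, t.length - i ≤ n → 1 ≤ p → p ≤ i → i ≤ t.length →
      neckLoop (t ++ [x]) i p =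
        (let st := stateB t i p
         if st.1 then none
         else if t.getD (t.length - st.2) 0 < x then some (t.length + 1)
         else if x < t.getD (t.length - st.2) 0 then none
         else some st.2) := by
  intro n
  induction n with
  | zero =>
    intro i p hn hp1 hpi hil
    have : i = t.length := by omega
    subst this
    rw [stateB, if_neg (lt_irrefl _)]
    simpa using neckLoop_last t x p hp1 (by omega)
  | succ n ih =>
    intro i p hn hp1 hpi hil
    by_cases hi : i < t.length
    · have h1 : i < (t ++ [x]).length := by simp; omega
      have h2 : (t ++ [x]).getD (i - p) 0 = t.getD (i - p) 0 :=
        List.getD_append _ _ _ _ (by omega)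
      have h3 : (t ++ [x]).getD i 0 = t.getD i 0 :=
        List.getD_append _ _ _ _ (by omega)
      rw [neckLoop, if_pos h1, h2, h3, stateB, if_pos hi]
      split
      · exact ih (i + 1) (i + 1) (by omega) (by omega) (by omega) (by omega)
      · split
        · rfl
        · exact ih (i + 1) p (by omega) hp1 (by omega) (by omega)
    · have : i = t.length := by omega
      subst this
      rw [stateB, if_neg (lt_irrefl _)]
      simpa using neckLoop_last t x p hp1 (by omega)
theorem isneck_ext (t : List Int) (x : Int) :
    is_necklace (t ++ [x]) = goodB t t.length (stateB t 1 1) x := by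
  by_cases ht : t = []
  · subst ht; simp [is_necklace, neckLoop, stateB, goodB]
  · have hlen : 0 < t.length := List.length_pos_of_ne_nil ht
    have hm : ¬ t.length = 0 := by omega
    have key := neckLoop_append t x t.length 1 1 (by omega) le_rfl le_rfl hlen
    simp only at key
    unfold is_necklace
    rw [key]
    obtain ⟨b, q⟩ := stateB t 1 1
    cases b
    · rcases lt_trichotomy (t[t.length - q]?.getD 0) x with h1 | h1 | h1
      · simp [goodB, List.getD, h1, Nat.mod_self]
      · simp [goodB, List.getD, h1, hm]
      · simp [goodB, List.getD, h1, hm, not_lt_of_gt h1]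
    · simp [goodB]

theorem tryNext_eq (t : List Int) (k : Int) (l : List Int) :
    tryNext t k l = tryNextB t t.length (stateB t 1 1) k l := by
  induction l with
  | nil => rfl
  | cons i rest ih => simp [tryNext, tryNextB, isneck_ext, ih]

-- ===== VERDICT (by name: the statement is the Claim_ definition above) =====
theorem f_spec : Claim_equal_f := by
  intro seq k _ hpre
  obtain ⟨hne, -⟩ := hpre
  obtain ⟨h, t, rfl⟩ := List.exists_cons_of_ne_nil hne
  unfold Spec_f f f_alt
  simp only [List.headD_cons, List.drop_one, List.tail_cons, List.length_cons]
  have hsum : ((t.length + 1 : Nat) : Int) - 1 = (t.length : Int) := by push_cast; ring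
  rw [hsum, tryNext_eq, isneck_ext]
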